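-- pv_equiv track=rewrite | github.com/NetManAIOps/OpenCompass-OpsQA | configs/xz/generate.py | check_model_category
-- ===== SOURCE A (Python) =====
-- def check_model_category(name: str, model_card):
--     if 'qwen' in name.lower():
--         if 'qwen1.5' in name.lower() or 'qwen-1.5' in name.lower():
--             return 'qwen1.5'
--         return 'qwen'
--     if 'yi' in name.lower():
--         return 'yi'
--     if name in model_card and "CONFIG" in model_card[name] and "BASE_NAME" in model_card[name]["CONFIG"]:
--         return check_model_category(model_card[name]["CONFIG"]["BASE_NAME"], model_card)
--     return 'default'
-- ===== SOURCE B (Python) =====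
-- def _classify(n):
--     low = n.lower()
--     if 'qwen' in low:
--         return 'qwen1.5' if ('qwen1.5' in low or 'qwen-1.5' in low) else 'qwen'
--     if 'yi' in low:
--         return 'yi'
--     return None
--
--
-- def _next_base(n, model_card):
--     entry = model_card.get(n)
--     if entry is None:
--         return None
--     cfg = entry.get('CONFIG')
--     if cfg is None:
--         return None
--     return cfg.get('BASE_NAME')
--
--
-- def check_model_category(name: str, model_card):
--     # stage 1: materialise the BASE_NAME chain (cut at a revisit, so it is always finite)
--     chain = []
--     visited = set()
--     cur = name
--     while cur is not None and cur not in visited: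
--         chain.append(cur)
--         visited.add(cur)
--         cur = _next_base(cur, model_card)
--     # stage 2: the first name in the chain with a recognised category wins
--     return next((c for c in map(_classify, chain) if c is not None), 'default')
-- ===== Notes on version B (the rewrite author's own statement) =====
-- stated objective: alternative
-- what changed: Two staged passes instead of A's tail recursion: stage 1 materialises the whole BASE_NAME chain into a list (cut at a revisit, so cycles terminate), stage 2 scans that list for the first name with a recognised category; A instead classifies and recurses in one interleaved recursion.
import Mathlib
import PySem

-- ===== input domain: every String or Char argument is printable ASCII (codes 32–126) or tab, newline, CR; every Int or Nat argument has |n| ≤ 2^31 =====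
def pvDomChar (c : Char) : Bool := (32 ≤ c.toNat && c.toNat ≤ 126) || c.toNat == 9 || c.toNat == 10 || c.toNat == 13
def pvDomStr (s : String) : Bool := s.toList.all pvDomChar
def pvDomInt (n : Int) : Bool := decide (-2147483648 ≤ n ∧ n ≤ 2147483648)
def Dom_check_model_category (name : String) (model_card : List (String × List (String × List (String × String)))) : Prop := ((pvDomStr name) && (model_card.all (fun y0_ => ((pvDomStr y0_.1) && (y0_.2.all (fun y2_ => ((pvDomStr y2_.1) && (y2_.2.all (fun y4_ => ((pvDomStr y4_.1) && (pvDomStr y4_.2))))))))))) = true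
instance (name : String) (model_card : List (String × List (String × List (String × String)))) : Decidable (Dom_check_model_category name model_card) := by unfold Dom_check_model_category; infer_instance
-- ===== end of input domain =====

-- B replaces A's interleaved classify-or-recurse tail recursion by two staged passes:
-- first materialise the BASE_NAME chain into a list (cut at a revisit, so cycles where A
-- raises RecursionError terminate with 'default'), then scan it for the first recognised
-- category. Return values agree wherever A returns (acyclic chains).

-- ===== PORT A =====
-- fuel = |model_card| + 1 only makes the recursion total; under Pre_ it is never exhausted
-- (a terminating chain passes through pairwise-distinct dict keys, of which there are ≤ |model_card|).
def checkGoA (card : List (String × List (String × List (String × String)))) : Nat → String → String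
  | 0, _ => "default"
  | f+1, name =>
    if PySem.Str.isIn "qwen" (PySem.Str.lower name) then
      if PySem.Str.isIn "qwen1.5" (PySem.Str.lower name) || PySem.Str.isIn "qwen-1.5" (PySem.Str.lower name) then "qwen1.5"
      else "qwen"
    else if PySem.Str.isIn "yi" (PySem.Str.lower name) then "yi"
    else
      match (PySem.Dict.mk card).get? name with
      | none => "default"
      | some entry =>
        match (PySem.Dict.mk entry).get? "CONFIG" with
        | none => "default"
        | some cfg =>
          match (PySem.Dict.mk cfg).get? "BASE_NAME" with
          | none => "default"
          | some base => checkGoA card f base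

def check_model_category (name : String) (model_card : List (String × List (String × List (String × String)))) : String :=
  checkGoA model_card (model_card.length + 1) name

-- ===== PORT B =====
-- _classify from Source B: the recognised category of one name, none otherwise
def classifyB (n : String) : Option String :=
  let low := PySem.Str.lower n
  if PySem.Str.isIn "qwen" low then
    some (if PySem.Str.isIn "qwen1.5" low || PySem.Str.isIn "qwen-1.5" low then "qwen1.5" else "qwen")
  else if PySem.Str.isIn "yi" low then some "yi"
  else none

-- _next_base from Source B: CONFIG.BASE_NAME link of one name, none when absent
def nextBase (card : List (String × List (String × List (String × String)))) (n : String) : Option String :=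
  match (PySem.Dict.mk card).get? n with
  | none => none
  | some entry =>
    match (PySem.Dict.mk entry).get? "CONFIG" with
    | none => none
    | some cfg => (PySem.Dict.mk cfg).get? "BASE_NAME"

-- stage 1: the while-loop building `chain`; fuel = |model_card| + 2 only makes it total
-- (the visited cut bounds the chain by the number of distinct dict keys + 1 ≤ |model_card| + 1)
def buildChain (card : List (String × List (String × List (String × String)))) : Nat → String → PySem.Set String → List String
  | 0, _, _ => []
  | f+1, cur, visited =>
    if PySem.Set.contains visited cur then []
    else
      cur :: (match nextBase card cur with
              | none => []
              | some nxt => buildChain card f nxt (PySem.Set.add visited cur))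

def check_model_category_alt (name : String) (model_card : List (String × List (String × List (String × String)))) : String :=
  let chain := buildChain model_card (model_card.length + 2) name PySem.Set.empty
  -- stage 2: first recognised category in the chain, else 'default'
  (chain.findSome? classifyB).getD "default"

-- ===== PRECONDITION & SPEC =====
-- one step of A's chain: none when the name is terminal for A (classified as qwen/yi,
-- or has no model_card entry with a CONFIG/BASE_NAME)
def pvStep? (card : List (String × List (String × List (String × String)))) (name : String) : Option String :=
  if PySem.Str.isIn "qwen" (PySem.Str.lower name) || PySem.Str.isIn "yi" (PySem.Str.lower name) then none
  else ((PySem.Dict.mk card).get? name).bind fun e =>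
       ((PySem.Dict.mk e).get? "CONFIG").bind fun c =>
       (PySem.Dict.mk c).get? "BASE_NAME"

def pvTerm (card : List (String × List (String × List (String × String)))) : Nat → String → Bool
  | 0, _ => false
  | f+1, n => match pvStep? card n with
    | none => true
    | some b => pvTerm card f b

-- Pre_ excludes exactly the inputs whose BASE_NAME chain from `name` is cyclic: there
-- Python A raises RecursionError (it diverges), so chain acyclicity IS A's domain, not a
-- proof convenience. pvStep?/pvTerm compute no category and are not the ports: they only
-- state the shape condition 'following CONFIG.BASE_NAME links from name reaches a terminal
-- name'. The bound |model_card|+1 loses nothing: a terminating chain passes through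
-- pairwise-distinct dict keys, so it reaches its terminal within |model_card|+1 steps.
def Pre_check_model_category (name : String) (model_card : List (String × List (String × List (String × String)))) : Prop :=
  pvTerm model_card (model_card.length + 1) name = true
instance (name : String) (model_card : List (String × List (String × List (String × String)))) : Decidable (Pre_check_model_category name model_card) := by unfold Pre_check_model_category; infer_instance

def pvWitness_check_model_category : String × (List (String × List (String × List (String × String)))) :=
  ("m", [("a", [("CONFIG", [("BASE_NAME", "myyi")])])])

def Spec_check_model_category (name : String) (model_card : List (String × List (String × List (String × String)))) (out : String) : Prop := out = check_model_category_alt name model_card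
instance (name : String) (model_card : List (String × List (String × List (String × String)))) (out : String) : Decidable (Spec_check_model_category name model_card out) := by unfold Spec_check_model_category; infer_instance

-- ===== CLAIM (what is proved, stated in full; the proofs are below) =====
def Claim_equal_check_model_category : Prop := ∀ (name : String) (model_card : List (String × List (String × List (String × String)))), Dom_check_model_category name model_card → Pre_check_model_category name model_card → Spec_check_model_category name model_card (check_model_category name model_card)

-- ===== LEMMAS AND PROOFS =====

-- pvIter card k n = the k-th element of the BASE_NAME chain from n (none if the chain stopped earlier)
def pvIter (card : List (String × List (String × List (String × String)))) : Nat → String → Option String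
  | 0, n => some n
  | k+1, n => (pvStep? card n).bind (pvIter card k)

lemma pvIter_term {card : List (String × List (String × List (String × String)))} :
    ∀ (k f : Nat) (n m : String), pvTerm card f n = true → pvIter card k n = some m →
      pvTerm card (f - k) m = true ∧ k < f := by
  intro k
  induction k with
  | zero =>
    intro f n m ht hi
    simp [pvIter] at hi
    subst hi
    cases f with
    | zero => simp [pvTerm] at ht
    | succ f => exact ⟨ht, Nat.succ_pos f⟩
  | succ k ih =>
    intro f n m ht hi
    simp only [pvIter] at hi
    cases hs : pvStep? card n with
    | none => rw [hs] at hi; simp at hi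
    | some b =>
      rw [hs] at hi; simp only [Option.bind_some] at hi
      cases f with
      | zero => simp [pvTerm] at ht
      | succ f =>
        simp only [pvTerm, hs] at ht
        obtain ⟨h1, h2⟩ := ih f b m ht hi
        exact ⟨by simpa using h1, by omega⟩

lemma pvIter_no_cycle {card : List (String × List (String × List (String × String)))} :
    ∀ (f k : Nat) (n : String), pvTerm card f n = true → pvIter card k n = some n → k = 0 := by
  intro f
  induction f using Nat.strong_induction_on with
  | _ f ih =>
    intro k n ht hi
    by_contra hk
    obtain ⟨h1, h2⟩ := pvIter_term k f n n ht hi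
    exact hk (ih (f - k) (by omega) k n h1 hi)

lemma chain_eq_goA {card : List (String × List (String × List (String × String)))} :
    ∀ (f fA fB : Nat) (n : String) (seen : PySem.Set String),
      f ≤ fA → f ≤ fB → pvTerm card f n = true →
      (∀ (k : Nat) (m : String), pvIter card k n = some m → PySem.Set.contains seen m = false) →
      ((buildChain card fB n seen).findSome? classifyB).getD "default" = checkGoA card fA n := by
  intro f
  induction f with
  | zero => intro fA fB n seen _ _ ht _; simp [pvTerm] at ht
  | succ f ih =>
    intro fA fB n seen hA hB ht hseen
    cases fA with
    | zero => omega
    | succ a =>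
    cases fB with
    | zero => omega
    | succ b =>
    have hn : PySem.Set.contains seen n = false := hseen 0 n (by simp [pvIter])
    simp only [checkGoA, buildChain, hn, Bool.false_eq_true, if_false]
    split_ifs with hq hq15 hy
    · have h : classifyB n = some "qwen1.5" := by
        simp only [classifyB]; rw [if_pos hq, if_pos hq15]
      simp [List.findSome?, h]
    · have h : classifyB n = some "qwen" := by
        simp only [classifyB]; rw [if_pos hq, if_neg hq15]
      simp [List.findSome?, h]
    · have h : classifyB n = some "yi" := by
        simp only [classifyB]; rw [if_neg hq, if_pos hy]
      simp [List.findSome?, h]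
    · -- no category at n: the chain scan moves to the tail
      have hcl : classifyB n = none := by
        simp only [classifyB]; rw [if_neg hq, if_neg hy]
      cases he : (PySem.Dict.mk card).get? n with
      | none => simp [nextBase, he, List.findSome?, hcl]
      | some entry =>
        cases hc : (PySem.Dict.mk entry).get? "CONFIG" with
        | none => simp [nextBase, he, hc, List.findSome?, hcl]
        | some cfg =>
          cases hb : (PySem.Dict.mk cfg).get? "BASE_NAME" with
          | none => simp [nextBase, he, hc, hb, List.findSome?, hcl]
          | some base =>
            have hnb : nextBase card n = some base := by simp [nextBase, he, hc, hb]
            simp only [hnb, List.findSome?, hcl, hc, hb]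
            have hstep : pvStep? card n = some base := by
              simp only [pvStep?, he, hc, hb, Option.bind_some]
              rw [if_neg]
              simp only [Bool.or_eq_true, not_or]
              exact ⟨hq, hy⟩
            have ht' : pvTerm card f base = true := by
              simpa only [pvTerm, hstep] using ht
            apply ih a b base (PySem.Set.add seen n) (by omega) (by omega) ht'
            intro k m hkm
            have hk1 : pvIter card (k+1) n = some m := by
              simp [pvIter, hstep, hkm]
            have hne : m ≠ n := by
              intro h; rw [h] at hk1
              exact Nat.succ_ne_zero k (pvIter_no_cycle (f+1) (k+1) n ht hk1)
            have hm : PySem.Set.contains seen m = false := hseen (k+1) m hk1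
            cases hcm : PySem.Set.contains (PySem.Set.add seen n) m with
            | false => rfl
            | true =>
              exfalso
              rcases (PySem.Set.mem_add seen n m).mp
                ((PySem.Set.contains_iff (PySem.Set.add seen n) m).mp hcm) with h | h
              · rw [(PySem.Set.contains_iff seen m).mpr h] at hm; simp at hm
              · exact hne h

-- ===== VERDICT (by name: the statement is the Claim_ definition above) =====
theorem check_model_category_spec : Claim_equal_check_model_category := by
  intro name card _ hpre
  unfold Spec_check_model_category check_model_category check_model_category_alt
  exact (chain_eq_goA (card.length + 1) (card.length + 1) (card.length + 2) name PySem.Set.empty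
    (le_refl _) (by omega) hpre
    (fun k m _ => by simp [PySem.Set.empty, PySem.Set.contains])).symm
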